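-- pv_equiv track=rewrite | github.com/hicklingd/project_euler_doug | 55.py | lychrel
-- ===== SOURCE A (Python) =====
-- def is_palindrome(number, iteration, list_tried):
--     iteration += 1
--
--     number = number + int(str(number)[::-1])
--
--     if str(number) == str(number)[::-1]:
--         return list_tried
--     elif iteration == 50:
--         return []
--     else:
--         if number < 10000:
--             list_tried.append(number)
--         return is_palindrome(number, iteration, list_tried)
--
-- def lychrel(n):
--     sieve = [True] * n
--     for i in range(n):
--
--         if sieve[i]:
--             starting_number = i
--             list_of_non_lychrel = is_palindrome(starting_number, 0, [starting_number])
--             for index in list_of_non_lychrel: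
--                 sieve[index] = False
--
--     return [i for i in range(n) if sieve[i]]
-- ===== SOURCE B (Python) =====
-- def lychrel(n):
--     def reaches_palindrome(i):
--         number = i
--         for _ in range(50):
--             number += int(str(number)[::-1])
--             s = str(number)
--             if s == s[::-1]:
--                 return True
--         return False
--     return [i for i in range(n) if not reaches_palindrome(i)]
-- ===== Notes on version B (the rewrite author's own statement) =====
-- stated objective: simpler
-- what changed: Dropped A's shared sieve and chain bookkeeping entirely: B tests each i independently with a bounded reverse-add loop and returns the comprehension of the numbers that never reach a palindrome within 50 steps.
-- outside the precondition, e.g. on lychrel(6): A raises IndexError, B returns []; on lychrel(50): A raises IndexError, B returns []; on lychrel(20): A raises IndexError, B returns []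
-- crash fix: For 6 <= n <= 9878 except n = 19 the unguarded sieve[index] = False in A raises IndexError (a chain member is >= n); B returns the list of Lychrel numbers below n there. — e.g. on lychrel(6): A raises IndexError, B returns []
import Mathlib
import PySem

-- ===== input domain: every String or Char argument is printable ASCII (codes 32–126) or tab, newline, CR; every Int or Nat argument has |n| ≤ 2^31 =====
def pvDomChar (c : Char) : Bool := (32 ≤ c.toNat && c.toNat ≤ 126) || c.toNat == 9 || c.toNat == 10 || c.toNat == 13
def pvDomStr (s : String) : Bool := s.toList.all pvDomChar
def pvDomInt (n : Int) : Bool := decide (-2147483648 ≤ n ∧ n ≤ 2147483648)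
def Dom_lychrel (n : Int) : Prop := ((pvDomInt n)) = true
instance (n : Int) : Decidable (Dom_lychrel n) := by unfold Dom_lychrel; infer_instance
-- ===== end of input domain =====

-- B drops A's shared sieve and chain bookkeeping: it tests each i independently with a
-- bounded reverse-add loop (objective: simpler; not faster).

-- ===== PORT A =====
-- number + int(str(number)[::-1]); every reachable call has 0 ≤ number, so ofChars? is
-- always some and the .getD 0 default is unreachable.
def revAdd (number : Int) : Int :=
  number + ((PySem.Int.ofChars? ((PySem.Int.toChars number).reverse)).getD 0)

-- str(number) == str(number)[::-1]
def isPalNum (number : Int) : Bool :=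
  (PySem.Int.toChars number) = (PySem.Int.toChars number).reverse

-- is_palindrome(number, iteration, list_tried); recursion depth is bounded by the
-- iteration == 50 test, so a fuel parameter ≥ 50 - iteration makes it structural;
-- lychrel calls it with fuel = 50, iteration = 0, and the fuel-0 branch is unreachable.
def isPalindrome : Nat → Int → Int → List Int → List Int
  | fuel, number, iteration, listTried =>
    let iteration := iteration + 1
    let number := revAdd number
    if isPalNum number then listTried
    else if iteration == 50 then []
    else
      match fuel with
      | 0 => []
      | f + 1 =>
        isPalindrome f number iteration
          (if number < 10000 then listTried ++ [number] else listTried)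

-- sieve[i] → getD i.toNat (0 ≤ i < len always); sieve[index] = False → set index.toNat
-- (exact inside Pre_, where every marked index is in range; Python raises outside Pre_).
def lychrel (n : Int) : List Int :=
  let sieve := List.replicate n.toNat true
  let sieve := (PySem.List.pyRange 0 n 1).foldl
    (fun sieve i =>
      if sieve.getD i.toNat false then
        let listOfNonLychrel := isPalindrome 50 i 0 [i]
        listOfNonLychrel.foldl (fun s index => s.set index.toNat false) sieve
      else sieve) sieve
  (PySem.List.pyRange 0 n 1).filter (fun i => sieve.getD i.toNat false)

-- ===== PORT B =====
-- the inner bounded loop of Source B: 'for _ in range(50): number += …; if pal: return True'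
def reaches : Nat → Int → Bool
  | 0, _ => false
  | f + 1, x =>
    let y := revAdd x
    if isPalNum y then true else reaches f y

-- [i for i in range(n) if not reaches_palindrome(i)]
def lychrel_alt (n : Int) : List Int :=
  (PySem.List.pyRange 0 n 1).filter (fun i => !(reaches 50 i))

-- ===== PRECONDITION & SPEC =====
-- Pre_ excludes exactly the n on which the Python A raises IndexError: for
-- 6 ≤ n ≤ 9878 (except n = 19) some chain member is ≥ n and the unguarded
-- sieve[index] = False goes out of range.
def Pre_lychrel (n : Int) : Prop := n ≤ 5 ∨ n = 19 ∨ 9879 ≤ n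
instance (n : Int) : Decidable (Pre_lychrel n) := by unfold Pre_lychrel; infer_instance
def pvWitness_lychrel : Int := (19)

-- For 6 ≤ n ≤ 9878 except n = 19 A raises IndexError; B returns the Lychrel list there.
def Raises_lychrel (n : Int) : Prop := 6 ≤ n ∧ n ≤ 9878 ∧ n ≠ 19
instance (n : Int) : Decidable (Raises_lychrel n) := by unfold Raises_lychrel; infer_instance
def pvRaiseWitness_lychrel : Int := (6)
def pvRaiseWitnessOut_lychrel : List Int := []

def Spec_lychrel (n : Int) (out : List Int) : Prop := out = lychrel_alt n
instance (n : Int) (out : List Int) : Decidable (Spec_lychrel n out) := by unfold Spec_lychrel; infer_instance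

-- ===== CLAIM (what is proved, stated in full; the proofs are below) =====
def Claim_equal_lychrel : Prop := ∀ (n : Int), Dom_lychrel n → Pre_lychrel n → Spec_lychrel n (lychrel n)
def Claim_raises_lychrel : Prop := (∀ (n : Int), Dom_lychrel n → Raises_lychrel n → ¬ Pre_lychrel n) ∧ (Dom_lychrel (pvRaiseWitness_lychrel) ∧ Raises_lychrel (pvRaiseWitness_lychrel) ∧ lychrel_alt (pvRaiseWitness_lychrel) = pvRaiseWitnessOut_lychrel)

-- ===== LEMMAS AND PROOFS =====

-- the numbers A appends to the chain along the way (only meaningful when the chain succeeds)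
def extras : Nat → Int → List Int
  | 0, _ => []
  | f + 1, x =>
    let y := revAdd x
    if isPalNum y then []
    else (if y < 10000 then [y] else []) ++ extras f y

theorem isPalindrome_eq (fuel : Nat) (number iteration : Int) (listTried : List Int) :
    isPalindrome fuel number iteration listTried =
      (let iteration := iteration + 1
       let number := revAdd number
       if isPalNum number then listTried
       else if iteration == 50 then []
       else
         match fuel with
         | 0 => []
         | f + 1 =>
           isPalindrome f number iteration
             (if number < 10000 then listTried ++ [number] else listTried)) := by
  rw [isPalindrome.eq_def]

-- A's helper, characterised by B's test: success returns chain ++ extras, failure []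
theorem reaches_succ (f : Nat) (x : Int) :
    reaches (f + 1) x = if isPalNum (revAdd x) then true else reaches f (revAdd x) := rfl

theorem extras_succ (f : Nat) (x : Int) :
    extras (f + 1) x =
      if isPalNum (revAdd x) then []
      else (if revAdd x < 10000 then [revAdd x] else []) ++ extras f (revAdd x) := rfl

theorem isPalindrome_char (f : Nat) :
    ∀ (number : Int) (chain : List Int),
      isPalindrome (f + 1) number (49 - (f : Int)) chain =
        if reaches (f + 1) number then chain ++ extras (f + 1) number else [] := by
  induction f with
  | zero =>
    intro number chain
    rw [isPalindrome_eq, reaches_succ 0 number, extras_succ 0 number]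
    simp only [reaches]
    split
    · simp
    · norm_num
  | succ f ih =>
    intro number chain
    rw [isPalindrome_eq, reaches_succ (f + 1) number, extras_succ (f + 1) number]
    by_cases hp : isPalNum (revAdd number) = true
    · simp [hp]
    · have h50 : ((49 : Int) - ((f + 1 : Nat) : Int) + 1 == 50) = false := by
        simp only [beq_eq_false_iff_ne]; push_cast; omega
      have harg : (49 : Int) - ((f + 1 : Nat) : Int) + 1 = 49 - (f : Int) := by
        push_cast; omega
      simp only [if_neg hp, h50, Bool.false_eq_true, if_false]
      rw [harg, ih]
      by_cases hr : reaches (f + 1) (revAdd number) = true <;>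
        by_cases hlt : revAdd number < 10000 <;>
          simp [hr, hlt]

theorem reaches_mono (g : Nat) :
    ∀ (f : Nat) (x : Int), f ≤ g → reaches f x = true → reaches g x = true := by
  induction g with
  | zero => intro f x hf h; interval_cases f; exact h
  | succ g ih =>
    intro f x hf h
    match f, h with
    | f' + 1, h =>
      simp only [reaches] at h ⊢
      split
      · rfl
      · rename_i hp
        rw [if_neg hp] at h
        exact ih f' (revAdd x) (by omega) h

theorem extras_reaches (f : Nat) :
    ∀ (x j : Int), f ≤ 50 → reaches f x = true → j ∈ extras f x → reaches 50 j = true := by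
  induction f with
  | zero => intro x j _ _ hj; simp [extras] at hj
  | succ f ih =>
    intro x j hf hr hj
    simp only [extras] at hj
    simp only [reaches] at hr
    by_cases hp : isPalNum (revAdd x) = true
    · rw [if_pos hp] at hj; simp at hj
    · rw [if_neg hp] at hj hr
      rcases List.mem_append.mp hj with hj | hj
      · have hjx : j = revAdd x := by
          by_cases hlt : revAdd x < 10000
          · rw [if_pos hlt] at hj; simpa using hj
          · rw [if_neg hlt] at hj; simp at hj
        subst hjx
        exact reaches_mono 50 f (revAdd x) (by omega) hr
      · exact ih (revAdd x) j (by omega) hr hj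

-- every index A marks is (after toNat-casting) a number whose chain reaches a palindrome
theorem marked_reaches (i : Int) (hi : 0 ≤ i) (idx : Int)
    (h : idx ∈ isPalindrome 50 i 0 [i]) : reaches 50 ((idx.toNat : Int)) = true := by
  have h49 : (0 : Int) = 49 - ((49 : Nat) : Int) := by norm_num
  rw [h49, isPalindrome_char 49 i [i]] at h
  by_cases hr : reaches 50 i = true
  · rw [if_pos hr] at h
    rcases List.mem_append.mp h with h | h
    · simp at h
      subst h
      rwa [Int.toNat_of_nonneg hi]
    · by_cases hnn : 0 ≤ idx
      · rw [Int.toNat_of_nonneg hnn]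
        exact extras_reaches 50 i idx (by omega) hr h
      · have : idx.toNat = 0 := by omega
        rw [this]
        decide
  · rw [if_neg hr] at h; simp at h

-- marking fold: an entry of the sieve is false afterwards iff it was false or got marked
theorem markFold_length (L : List Int) :
    ∀ (sieve : List Bool),
      (L.foldl (fun s idx => s.set idx.toNat false) sieve).length = sieve.length := by
  induction L with
  | nil => intro sieve; rfl
  | cons a L ih => intro sieve; rw [List.foldl_cons, ih]; simp

theorem markFold_getD (L : List Int) :
    ∀ (sieve : List Bool) (j : Nat), j < sieve.length →
      (L.foldl (fun s idx => s.set idx.toNat false) sieve).getD j false =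
        (sieve.getD j false && !(L.any (fun idx => idx.toNat == j))) := by
  induction L with
  | nil => intro sieve j hj; simp
  | cons a L ih =>
    intro sieve j hj
    rw [List.foldl_cons, ih (sieve.set a.toNat false) j (by simpa using hj)]
    have hset : (sieve.set a.toNat false).getD j false =
        (sieve.getD j false && !(a.toNat == j)) := by
      by_cases he : a.toNat = j
      · subst he
        simp [List.getD_eq_getElem?_getD, hj]
      · simp [List.getD_eq_getElem?_getD, List.getElem?_set_ne he, he]
    rw [hset]
    simp [Bool.and_assoc]

-- the invariant threaded through A's sieve loop
def good (N : Nat) (sieve : List Bool) (k : Nat) : Prop :=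
  sieve.length = N ∧
  (∀ j : Nat, j < N → sieve.getD j false = false → reaches 50 (j : Int) = true) ∧
  (∀ j : Nat, j < k → reaches 50 (j : Int) = true → sieve.getD j false = false)

theorem good_step (N : Nat) (sieve : List Bool) (a : Nat) (ha : a < N)
    (hg : good N sieve a) :
    good N
      (if sieve.getD ((a : Int)).toNat false then
        (isPalindrome 50 (a : Int) 0 [(a : Int)]).foldl
          (fun s index => s.set index.toNat false) sieve
       else sieve) (a + 1) := by
  obtain ⟨hlen, hsound, hcomp⟩ := hg
  have hta : ((a : Int)).toNat = a := by simp
  rw [hta]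
  by_cases hget : sieve.getD a false = true
  · rw [if_pos hget]
    set L := isPalindrome 50 (a : Int) 0 [(a : Int)] with hL
    refine ⟨by rw [markFold_length]; exact hlen, ?_, ?_⟩
    · intro j hj hfalse
      rw [markFold_getD L sieve j (by omega)] at hfalse
      rcases Bool.and_eq_false_iff.mp hfalse with h | h
      · exact hsound j hj h
      · simp only [Bool.not_eq_false', List.any_eq_true, beq_iff_eq] at h
        obtain ⟨idx, hidx, hje⟩ := h
        rw [← hje]
        exact marked_reaches (a : Int) (by positivity) idx hidx
    · intro j hj hr
      rw [markFold_getD L sieve j (by omega)]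
      rcases Nat.lt_succ_iff_lt_or_eq.mp hj with hj | hj
      · rw [hcomp j hj hr]; simp
      · subst hj
        have hmem : (j : Int) ∈ L := by
          rw [hL]
          have h49 : (0 : Int) = 49 - ((49 : Nat) : Int) := by norm_num
          rw [h49, isPalindrome_char 49 (j : Int) [(j : Int)]]
          rw [if_pos hr]
          simp
        have : L.any (fun idx => idx.toNat == j) = true := by
          simp only [List.any_eq_true, beq_iff_eq]
          exact ⟨(j : Int), hmem, by simp⟩
        rw [this]
        simp
  · rw [if_neg hget]
    refine ⟨hlen, hsound, ?_⟩
    intro j hj hr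
    rcases Nat.lt_succ_iff_lt_or_eq.mp hj with hj | hj
    · exact hcomp j hj hr
    · subst hj
      simpa using hget

theorem good_fold (N : Nat) (m : Nat) :
    ∀ (a : Nat) (sieve : List Bool), a + m ≤ N → good N sieve a →
      good N
        (((List.range' a m).map (fun (k : Nat) => (k : Int))).foldl
          (fun sieve i =>
            if sieve.getD i.toNat false then
              (isPalindrome 50 i 0 [i]).foldl (fun s index => s.set index.toNat false) sieve
            else sieve) sieve)
        (a + m) := by
  induction m with
  | zero => intro a sieve _ hg; simpa using hg
  | succ m ih =>
    intro a sieve hm hg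
    have hrw : (List.range' a (m + 1)).map (fun (k : Nat) => (k : Int)) =
        ((a : Int)) :: (List.range' (a + 1) m).map (fun (k : Nat) => (k : Int)) := by
      rw [List.range'_succ]; rfl
    rw [hrw, List.foldl_cons]
    have h1 := good_step N sieve a (by omega) hg
    have h2 := ih (a + 1) _ (by omega) h1
    have : a + 1 + m = a + (m + 1) := by omega
    rwa [this] at h2

-- range(n) as cast naturals
theorem pyRange_cast (n : Int) :
    PySem.List.pyRange 0 n 1 = (List.range' 0 n.toNat).map (fun (k : Nat) => (k : Int)) := by
  rw [PySem.List.pyRange_one, List.range_eq_range']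
  simp

-- ===== VERDICT (by name: the statement is the Claim_ definition above) =====
theorem lychrel_spec : Claim_equal_lychrel := by
  intro n _ _
  unfold Spec_lychrel lychrel lychrel_alt
  by_cases hn : 0 ≤ n
  · simp only []
    rw [pyRange_cast n]
    have hg0 : good n.toNat (List.replicate n.toNat true) 0 := by
      refine ⟨by simp, ?_, ?_⟩
      · intro j hj hf
        rw [List.getD_eq_getElem?_getD] at hf
        simp [hj] at hf
      · intro j hj; omega
    have hg := good_fold n.toNat n.toNat 0 (List.replicate n.toNat true) (by omega) hg0
    rw [Nat.zero_add] at hg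
    obtain ⟨hlen, hsound, hcomp⟩ := hg
    apply List.filter_congr
    intro i hi
    rw [List.mem_map] at hi
    obtain ⟨k, hk, rfl⟩ := hi
    have hkN : k < n.toNat := by
      have h := List.mem_range'.mp hk
      omega
    have hcast : ((k : Int)).toNat = k := by simp
    rw [hcast]
    by_cases hr : reaches 50 ((k : Int)) = true
    · rw [hcomp k hkN hr, hr]
      rfl
    · have ht : (((List.range' 0 n.toNat).map (fun (k : Nat) => (k : Int))).foldl
          (fun sieve i =>
            if sieve.getD i.toNat false then
              (isPalindrome 50 i 0 [i]).foldl (fun s index => s.set index.toNat false) sieve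
            else sieve) (List.replicate n.toNat true)).getD k false = true := by
        by_contra hft
        exact hr (hsound k hkN (by simpa using hft))
      rw [ht]
      simp only [Bool.not_eq_true] at hr
      rw [hr]
      rfl
  · have he : PySem.List.pyRange 0 n 1 = [] := PySem.List.pyRange_one_eq_nil (by omega)
    simp [he]

theorem lychrel_raises : Claim_raises_lychrel := by
  unfold Claim_raises_lychrel
  exact ⟨by intro n _ h; unfold Raises_lychrel at h; unfold Pre_lychrel; omega, by decide⟩

-- witness self-check, read off the raises theorem: B really returns the stated value at n = 6
theorem lychrel_raises_witness_ok :
    Raises_lychrel pvRaiseWitness_lychrel ∧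
      lychrel_alt pvRaiseWitness_lychrel = pvRaiseWitnessOut_lychrel :=
  (lychrel_raises).2.2
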